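-- pv_equiv track=rewrite | github.com/algoseer/pool-ncushion-finder | list_options.py | get_all_shots
-- ===== SOURCE A (Python) =====
-- def get_all_shots(last_bank = None, n = 3):
--   if n == 0:
--     return ['']
--   all_shots = []
--
--   for bank in 'LURD':
--     if bank != last_bank:
--       future_shots = get_all_shots(last_bank = bank, n = n-1)
--       all_shots.extend([bank+f for f  in future_shots])
--
--   return all_shots
-- ===== SOURCE B (Python) =====
-- def get_all_shots(last_bank=None, n=3):
--     if n == 0:
--         return ['']
--     seqs = [c for c in 'LURD' if c != last_bank]
--     for _ in range(n - 1):
--         seqs = [s + c for s in seqs for c in 'LURD' if c != s[-1]]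
--     return seqs
-- ===== Notes on version B (the rewrite author's own statement) =====
-- stated objective: alternative
-- what changed: Replaces A's depth-first recursion (prefixing each bank onto recursively enumerated futures) with an iterative breadth-first loop that extends a working list of prefixes one character at a time, preserving the L,U,R,D order.
import Mathlib
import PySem

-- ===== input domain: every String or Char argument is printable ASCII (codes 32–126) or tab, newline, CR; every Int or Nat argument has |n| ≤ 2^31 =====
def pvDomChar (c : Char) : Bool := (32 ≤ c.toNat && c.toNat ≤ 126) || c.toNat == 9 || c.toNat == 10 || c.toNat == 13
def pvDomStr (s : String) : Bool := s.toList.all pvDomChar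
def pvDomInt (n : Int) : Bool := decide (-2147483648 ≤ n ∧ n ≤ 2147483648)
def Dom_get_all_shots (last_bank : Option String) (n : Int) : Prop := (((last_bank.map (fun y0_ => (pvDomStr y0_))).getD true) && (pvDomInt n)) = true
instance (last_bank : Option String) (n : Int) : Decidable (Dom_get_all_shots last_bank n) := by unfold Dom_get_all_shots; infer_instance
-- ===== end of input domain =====

-- B is an iterative breadth-first rewrite of A's depth-first recursion; return values only (no mutation).

-- ===== PORT A =====
-- A recurses with n-1 until n == 0; the Int argument is threaded as a Nat fuel
-- (exact for n ≥ 0, which Pre_ requires; for n < 0 Python A never terminates).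
def get_all_shots_recA : Option String → Nat → List String
  | _, 0 => [""]
  | last_bank, Nat.succ m =>
      -- for bank in 'LURD': if bank != last_bank: all_shots.extend([bank+f for f in future_shots])
      ['L', 'U', 'R', 'D'].foldl
        (fun all_shots bank =>
          if some (String.singleton bank) ≠ last_bank then
            all_shots ++ (get_all_shots_recA (some (String.singleton bank)) m).map
              (fun f => String.singleton bank ++ f)
          else all_shots)
        []

def get_all_shots (last_bank : Option String) (n : Int) : List String :=
  get_all_shots_recA last_bank n.toNat

-- ===== PORT B =====
-- [s + c for s in seqs for c in 'LURD' if c != s[-1]]  (every s here is nonempty)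
def get_all_shots_stepB (seqs : List String) : List String :=
  seqs.flatMap (fun s =>
    (['L', 'U', 'R', 'D'].filter (fun c => s.toList.getLast? ≠ some c)).map
      (fun c => s ++ String.singleton c))

def get_all_shots_alt (last_bank : Option String) (n : Int) : List String :=
  if n = 0 then [""]
  else
    let init := (['L', 'U', 'R', 'D'].filter
      (fun c => some (String.singleton c) ≠ last_bank)).map String.singleton
    (List.range (n - 1).toNat).foldl (fun seqs _ => get_all_shots_stepB seqs) init

-- ===== PRECONDITION & SPEC =====
-- Pre_ excludes n < 0, on which Python A recurses forever (RecursionError).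
def Pre_get_all_shots (last_bank : Option String) (n : Int) : Prop := 0 ≤ n
instance (last_bank : Option String) (n : Int) : Decidable (Pre_get_all_shots last_bank n) := by
  unfold Pre_get_all_shots; infer_instance
def pvWitness_get_all_shots : Option String × Int := (some "L", 3)

def Spec_get_all_shots (last_bank : Option String) (n : Int) (out : List String) : Prop := out = get_all_shots_alt last_bank n
instance (last_bank : Option String) (n : Int) (out : List String) : Decidable (Spec_get_all_shots last_bank n out) := by unfold Spec_get_all_shots; infer_instance

-- ===== CLAIM (what is proved, stated in full; the proofs are below) =====
def Claim_equal_get_all_shots : Prop := ∀ (last_bank : Option String) (n : Int), Dom_get_all_shots last_bank n → Pre_get_all_shots last_bank n → Spec_get_all_shots last_bank n (get_all_shots last_bank n)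

-- ===== LEMMAS AND PROOFS =====

theorem singleton_inj (a b : Char) : String.singleton a = String.singleton b ↔ a = b := by
  constructor
  · intro h; have := congrArg String.toList h; simpa using this
  · rintro rfl; rfl

theorem flatMap_congr_mem {α β : Type} {l : List α} {f g : α → List β}
    (h : ∀ a ∈ l, f a = g a) : l.flatMap f = l.flatMap g := by
  rw [List.flatMap_def, List.flatMap_def, List.map_congr_left h]

-- A's level-(m+1) result in flatMap form
theorem recA_succ (last_bank : Option String) (m : Nat) :
    get_all_shots_recA last_bank (m + 1) =
      (['L', 'U', 'R', 'D'].filter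
        (fun c => some (String.singleton c) ≠ last_bank)).flatMap
        (fun c => (get_all_shots_recA (some (String.singleton c)) m).map
          (fun f => String.singleton c ++ f)) := by
  simp only [get_all_shots_recA, List.foldl, List.filter, List.flatMap]
  by_cases h1 : some (String.singleton 'L') ≠ last_bank <;>
  by_cases h2 : some (String.singleton 'U') ≠ last_bank <;>
  by_cases h3 : some (String.singleton 'R') ≠ last_bank <;>
  by_cases h4 : some (String.singleton 'D') ≠ last_bank <;>
    simp [h1, h2, h3, h4]

theorem recA_nonempty (m : Nat) (last_bank : Option String) (s : String)
    (hs : s ∈ get_all_shots_recA last_bank (m + 1)) : s ≠ "" := by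
  rw [recA_succ] at hs
  simp only [List.mem_flatMap, List.mem_map] at hs
  obtain ⟨c, _, f, _, rfl⟩ := hs
  intro h
  have : (String.singleton c ++ f).toList = ("" : String).toList := by rw [h]
  simp at this

theorem stepB_flatMap (l : List Char) (f : Char → List String) :
    get_all_shots_stepB (l.flatMap f) = l.flatMap (fun c => get_all_shots_stepB (f c)) := by
  induction l with
  | nil => rfl
  | cons a l ih =>
    simp only [List.flatMap_cons, get_all_shots_stepB, List.flatMap_append] at *
    rw [ih]

theorem stepB_map_singleton_append (c : Char) (xs : List String)
    (hne : ∀ x ∈ xs, x ≠ "") :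
    get_all_shots_stepB (xs.map (fun f => String.singleton c ++ f)) =
      (get_all_shots_stepB xs).map (fun f => String.singleton c ++ f) := by
  induction xs with
  | nil => rfl
  | cons x xs ih =>
    have hx : x ≠ "" := hne x (by simp)
    have hxs : ∀ y ∈ xs, y ≠ "" := fun y hy => hne y (by simp [hy])
    simp only [List.map_cons, get_all_shots_stepB, List.flatMap_cons] at *
    rw [ih hxs, List.map_append]
    congr 1
    have htl : (String.singleton c ++ x).toList = c :: x.toList := by simp
    have hxl : x.toList ≠ [] := by
      intro h
      exact hx (String.toList_inj.mp (by simpa using h))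
    have hlast : (String.singleton c ++ x).toList.getLast? = x.toList.getLast? := by
      rw [htl]
      cases hx' : x.toList with
      | nil => exact absurd hx' hxl
      | cons a l => simp
    rw [hlast, List.map_map]
    refine List.map_congr_left (fun d _ => ?_)
    exact String.toList_inj.mp (by simp)

theorem stepB_recA (m : Nat) (last_bank : Option String) :
    get_all_shots_stepB (get_all_shots_recA last_bank (m + 1)) =
      get_all_shots_recA last_bank (m + 2) := by
  induction m generalizing last_bank with
  | zero =>
    rw [recA_succ last_bank 0, stepB_flatMap, recA_succ last_bank 1]
    refine flatMap_congr_mem (fun c hc => ?_)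
    have e1 : (get_all_shots_recA (some (String.singleton c)) 0).map
        (fun f => String.singleton c ++ f) = [String.singleton c] := by
      simp [get_all_shots_recA]
    rw [e1, recA_succ (some (String.singleton c)) 0]
    have e3 : ∀ (F : List Char), F.flatMap
        (fun d => (get_all_shots_recA (some (String.singleton d)) 0).map
          (fun f => String.singleton d ++ f)) = F.map String.singleton := by
      intro F
      induction F with
      | nil => rfl
      | cons a F ih =>
        simp only [List.flatMap_cons, List.map_cons]
        rw [ih]
        simp [get_all_shots_recA]
    rw [e3, List.map_map]
    simp only [get_all_shots_stepB, List.flatMap_cons, List.flatMap_nil, List.append_nil]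
    have e4 : List.filter
        (fun d => decide ((String.singleton c).toList.getLast? ≠ some d)) ['L', 'U', 'R', 'D'] =
        List.filter (fun d => decide (some (String.singleton d) ≠ some (String.singleton c)))
          ['L', 'U', 'R', 'D'] :=
      List.filter_congr (fun d _ => by simp [singleton_inj, eq_comm])
    rw [e4]
    exact List.map_congr_left (fun d _ => String.toList_inj.mp (by simp))
  | succ m ih =>
    rw [recA_succ last_bank (m + 1 + 1), recA_succ last_bank (m + 1), stepB_flatMap]
    refine flatMap_congr_mem (fun c hc => ?_)
    rw [stepB_map_singleton_append c _ (fun x hx => recA_nonempty m _ x hx), ih]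

theorem foldl_stepB_range (k : Nat) (last_bank : Option String) :
    (List.range k).foldl (fun seqs _ => get_all_shots_stepB seqs)
        (get_all_shots_recA last_bank 1) =
      get_all_shots_recA last_bank (k + 1) := by
  induction k with
  | zero => rfl
  | succ k ih =>
    rw [List.range_succ, List.foldl_append, ih, List.foldl_cons, List.foldl_nil,
      stepB_recA]

theorem init_eq_recA_one (last_bank : Option String) :
    (['L', 'U', 'R', 'D'].filter
      (fun c => some (String.singleton c) ≠ last_bank)).map String.singleton =
      get_all_shots_recA last_bank 1 := by
  rw [recA_succ]
  have e3 : ∀ (F : List Char), F.flatMap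
      (fun d => (get_all_shots_recA (some (String.singleton d)) 0).map
        (fun f => String.singleton d ++ f)) = F.map String.singleton := by
    intro F
    induction F with
    | nil => rfl
    | cons a F ih =>
      simp only [List.flatMap_cons, List.map_cons]
      rw [ih]
      simp [get_all_shots_recA]
  exact (e3 _).symm

-- ===== VERDICT (by name: the statement is the Claim_ definition above) =====
theorem get_all_shots_spec : Claim_equal_get_all_shots := by
  intro last_bank n _ hpre
  unfold Spec_get_all_shots get_all_shots get_all_shots_alt
  by_cases h0 : n = 0
  · subst h0; rfl
  · have hn : 1 ≤ n := lt_of_le_of_ne hpre (Ne.symm h0)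
    rw [if_neg h0, init_eq_recA_one, foldl_stepB_range]
    congr 1
    omega
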